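-- pv_equiv track=rewrite | github.com/XsedoX/CryptographyAndBasicsOfCryptanalysis | e1/e1.py | extract_functions_from_sbox
-- ===== SOURCE A (Python) =====
-- def get_nth_bit(int_num, n):
--     return (int_num >> n) & 1
--
-- def extract_functions_from_sbox(sbox, amount_of_arguments):
--     result = []
--     for i in range(amount_of_arguments):
--         result.append([])
--
--     skip = False
--     for byte in sbox:
--         if not skip:
--             for nthBit in range(amount_of_arguments):
--                 result[nthBit].append(get_nth_bit(byte, nthBit))
--         skip = not skip
--
--     return result
-- ===== SOURCE B (Python) =====
-- def extract_functions_from_sbox(sbox, amount_of_arguments):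
--     planes = []
--     current = sbox[::2]
--     for _ in range(amount_of_arguments):
--         planes.append([b & 1 for b in current])
--         current = [b >> 1 for b in current]
--     return planes
-- ===== Notes on version B (the rewrite author's own statement) =====
-- stated objective: alternative
-- what changed: B drops get_nth_bit and the skip toggle entirely: it slices the even-indexed bytes once, then peels bit-planes by repeatedly taking each residue's low bit (& 1) and halving the whole residue list (>> 1) per iteration, maintaining a shrinking-value residue list instead of A's indexed bit extraction appending into all planes at once.
import Mathlib
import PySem

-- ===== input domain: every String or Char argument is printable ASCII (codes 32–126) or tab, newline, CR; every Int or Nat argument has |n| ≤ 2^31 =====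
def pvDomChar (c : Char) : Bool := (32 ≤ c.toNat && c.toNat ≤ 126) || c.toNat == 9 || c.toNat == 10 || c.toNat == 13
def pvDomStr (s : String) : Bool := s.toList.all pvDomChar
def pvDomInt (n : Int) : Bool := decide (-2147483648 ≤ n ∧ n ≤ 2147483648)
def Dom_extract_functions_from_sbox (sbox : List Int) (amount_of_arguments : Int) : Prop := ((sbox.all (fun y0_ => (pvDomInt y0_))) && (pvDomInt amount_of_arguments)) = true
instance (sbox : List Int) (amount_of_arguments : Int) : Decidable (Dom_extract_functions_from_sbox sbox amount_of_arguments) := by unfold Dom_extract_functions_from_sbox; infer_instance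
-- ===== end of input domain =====

-- B peels bit-planes by repeatedly taking each residue's low bit and halving the residue list
-- (no per-bit indexing, no skip toggle); same return value, no speed claim.

-- ===== PORT A =====
-- (int_num >> n) & 1; A only calls it with n from range(...), hence n ≥ 0, where n.toNat is exact
def get_nth_bit (int_num n : Int) : Int := PySem.Int.band (int_num >>> n.toNat) 1

def extract_functions_from_sbox (sbox : List Int) (amount_of_arguments : Int) : List (List Int) :=
  let result : List (List Int) :=
    (PySem.List.pyRange 0 amount_of_arguments 1).foldl (fun r _ => r ++ [[]]) []
  let st := sbox.foldl
    (fun (st : List (List Int) × Bool) byte =>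
      if !st.2 then
        ((PySem.List.pyRange 0 amount_of_arguments 1).foldl
          (fun r n => r.modify n.toNat (fun l => l ++ [get_nth_bit byte n])) st.1, !st.2)
      else (st.1, !st.2))
    (result, false)
  st.1

-- ===== PORT B =====
-- sbox[::2] via slice?; the step is the literal 2 ≠ 0, so slice? is always `some` (getD never fires)
def extract_functions_from_sbox_alt (sbox : List Int) (amount_of_arguments : Int) : List (List Int) :=
  let selected := (PySem.List.slice? sbox none none 2).getD []
  let st := (PySem.List.pyRange 0 amount_of_arguments 1).foldl
    (fun (st : List (List Int) × List Int) _ =>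
      (st.1 ++ [st.2.map (fun b => PySem.Int.band b 1)], st.2.map (fun (b : Int) => b >>> (1 : Nat))))
    ([], selected)
  st.1

-- ===== PRECONDITION & SPEC =====
def Spec_extract_functions_from_sbox (sbox : List Int) (amount_of_arguments : Int) (out : List (List Int)) : Prop := out = extract_functions_from_sbox_alt sbox amount_of_arguments
instance (sbox : List Int) (amount_of_arguments : Int) (out : List (List Int)) : Decidable (Spec_extract_functions_from_sbox sbox amount_of_arguments out) := by unfold Spec_extract_functions_from_sbox; infer_instance

-- ===== CLAIM (what is proved, stated in full; the proofs are below) =====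
def Claim_equal_extract_functions_from_sbox : Prop := ∀ (sbox : List Int) (amount_of_arguments : Int), Dom_extract_functions_from_sbox sbox amount_of_arguments → Spec_extract_functions_from_sbox sbox amount_of_arguments (extract_functions_from_sbox sbox amount_of_arguments)

-- ===== LEMMAS AND PROOFS =====

-- the subsequence of bytes A actually processes: skip=false keeps, skip=true drops, toggling
def pvTaken : Bool → List Int → List Int
  | _, [] => []
  | false, b :: t => b :: pvTaken true t
  | true, _ :: t => pvTaken false t

-- the even-indexed elements, two at a time
def pvEvens : List Int → List Int
  | [] => []
  | [a] => [a]
  | a :: _ :: t => a :: pvEvens t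

-- the list B's loop builds: one plane per iteration, halving the residues each time
def pvPeel : Nat → List Int → List (List Int)
  | 0, _ => []
  | k + 1, cur => cur.map (fun b => PySem.Int.band b 1) :: pvPeel k (cur.map (fun (b : Int) => b >>> (1 : Nat)))

theorem pv_taken_evens : ∀ (xs : List Int), pvTaken false xs = pvEvens xs := by
  intro xs
  induction xs using pvEvens.induct with
  | case1 => rfl
  | case2 a => rfl
  | case3 a b t ih => simp [pvTaken, pvEvens, ih]

theorem pv_slice2 : ∀ (xs : List Int),
    PySem.List.slice? xs none none 2 = some (pvEvens xs) := by
  have key : ∀ (xs : List Int),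
      (List.range ((xs.length + 2 - 1) / 2)).filterMap
        (fun (k : Nat) => xs[((0 : Int) + 2 * (k : Int)).toNat]?) = pvEvens xs := by
    intro xs
    induction xs using pvEvens.induct with
    | case1 => rfl
    | case2 a => simp [List.range_succ, pvEvens]
    | case3 a b t ih =>
      have hlen : ((a :: b :: t).length + 2 - 1) / 2 = (t.length + 2 - 1) / 2 + 1 := by
        simp [List.length_cons]; omega
      rw [hlen, List.range_succ_eq_map, List.filterMap_cons, List.filterMap_map]
      show a :: List.filterMap
          ((fun (k : Nat) => (a :: b :: t)[((0 : Int) + 2 * (k : Int)).toNat]?) ∘ Nat.succ)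
          (List.range ((t.length + 2 - 1) / 2)) = pvEvens (a :: b :: t)
      have harg : ((fun (k : Nat) => (a :: b :: t)[((0 : Int) + 2 * (k : Int)).toNat]?) ∘ Nat.succ)
          = fun (k : Nat) => t[((0 : Int) + 2 * (k : Int)).toNat]? := by
        funext k
        have h2 : ((0 : Int) + 2 * ((Nat.succ k : Nat) : Int)).toNat
            = (((0 : Int) + 2 * (k : Int)).toNat) + 1 + 1 := by omega
        simp only [Function.comp_apply, h2, List.getElem?_cons_succ]
      rw [harg, ih]
      rfl
  intro xs
  unfold PySem.List.slice?
  simp only [show ((2 : Int) = 0) = False by simp, if_false]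
  have hidx : PySem.List.sliceIndices xs.length none none 2 = (0, (xs.length : Int), 2) := by
    simp [PySem.List.sliceIndices]
  rw [hidx]
  by_cases h : xs = []
  · subst h; rfl
  · have hlen : 0 < xs.length := List.length_pos_iff.mpr h
    have hcount : (if (0 : Int) < 2 then
        if (0 : Int) < (xs.length : Int) then ((((xs.length : Int)) - 0 + 2 - 1) / 2).toNat else 0
        else if (xs.length : Int) < 0 then ((0 - (xs.length : Int) + -2 - 1) / -2).toNat else 0)
        = (xs.length + 2 - 1) / 2 := by
      rw [if_pos (by norm_num), if_pos (by exact_mod_cast hlen)]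
      omega
    simp only [hcount]
    rw [key]

theorem pv_foldl_peel :
    ∀ (l : List Int) (planes : List (List Int)) (cur : List Int),
    (l.foldl
      (fun (st : List (List Int) × List Int) _ =>
        (st.1 ++ [st.2.map (fun b => PySem.Int.band b 1)], st.2.map (fun (b : Int) => b >>> (1 : Nat))))
      (planes, cur)).1 = planes ++ pvPeel l.length cur := by
  intro l
  induction l with
  | nil => intro planes cur; simp [pvPeel]
  | cons x t ih =>
    intro planes cur
    rw [List.foldl_cons, ih]
    simp [pvPeel]

theorem pv_peel_planes : ∀ (m : Nat) (cur : List Int),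
    pvPeel m cur = (List.range m).map (fun (k : Nat) => cur.map (fun b => get_nth_bit b (k : Int))) := by
  intro m
  induction m with
  | zero => intro cur; rfl
  | succ n ih =>
    intro cur
    rw [pvPeel, List.range_succ_eq_map, List.map_cons, List.map_map, ih]
    congr 1
    · apply List.map_congr_left
      intro b _
      simp [get_nth_bit]
    · apply List.map_congr_left
      intro k _
      rw [List.map_map]
      apply List.map_congr_left
      intro b _
      simp only [Function.comp_apply, get_nth_bit]
      have h2 : (((fun x => x + 1) k : Nat) : Int).toNat = k + 1 := by
        simp
      rw [h2, show ((k : Nat) : Int).toNat = k from by simp, Nat.add_comm, Int.shiftRight_add]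

theorem pv_foldl_append_nil (l : List Int) (acc : List (List Int)) :
    l.foldl (fun r _ => r ++ [([] : List Int)]) acc = acc ++ l.map (fun _ => []) := by
  induction l generalizing acc with
  | nil => simp
  | cons a t ih => simp [List.foldl_cons, ih]

theorem pv_modify_succ_cons (a : List Int) (R : List (List Int)) (i : Nat)
    (f : List Int → List Int) : (a :: R).modify (i + 1) f = a :: R.modify i f := rfl

theorem pv_mapIdx_id : ∀ (R : List (List Int)), R.mapIdx (fun _ l => l) = R := by
  intro R
  induction R with
  | nil => rfl
  | cons a t ih => simp [List.mapIdx_cons, ih]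

theorem pv_foldl_modify_cons (g : Nat → List Int → List Int) :
    ∀ (is : List Nat) (a : List Int) (R : List (List Int)),
    is.foldl (fun r i => r.modify (i + 1) (g i)) (a :: R)
      = a :: is.foldl (fun r i => r.modify i (g i)) R := by
  intro is
  induction is with
  | nil => intro a R; rfl
  | cons i t ih => intro a R; rw [List.foldl_cons, List.foldl_cons, pv_modify_succ_cons, ih]

theorem pv_foldl_modify_range :
    ∀ (R : List (List Int)) (g : Nat → List Int → List Int),
    (List.range R.length).foldl (fun r i => r.modify i (g i)) R
      = R.mapIdx (fun i l => g i l) := by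
  intro R
  induction R with
  | nil => intro g; rfl
  | cons a t ih =>
    intro g
    rw [List.length_cons, List.range_succ_eq_map, List.foldl_cons, List.foldl_map]
    have h0 : (a :: t).modify 0 (g 0) = g 0 a :: t := by simp [List.modify]
    rw [h0, pv_foldl_modify_cons (fun i => g (i + 1)), ih (fun i => g (i + 1))]
    simp [List.mapIdx_cons]

theorem pv_inner_eq (byte amount : Int) (R : List (List Int))
    (hR : R.length = (amount - 0).toNat) :
    (PySem.List.pyRange 0 amount 1).foldl
        (fun r n => r.modify n.toNat (fun l => l ++ [get_nth_bit byte n])) R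
      = R.mapIdx (fun i l => l ++ [get_nth_bit byte (i : Int)]) := by
  rw [PySem.List.pyRange_one, List.foldl_map]
  have : (fun (r : List (List Int)) (k : Nat) =>
      r.modify ((0 : Int) + (k : Int)).toNat (fun l => l ++ [get_nth_bit byte ((0:Int) + (k:Int))]))
      = fun r k => r.modify k ((fun i l => l ++ [get_nth_bit byte (i : Int)]) k) := by
    funext r k; simp
  rw [this, ← hR, pv_foldl_modify_range]

theorem pv_outer (amount : Int) :
    ∀ (sbox : List Int) (skip : Bool) (R : List (List Int)),
    R.length = (amount - 0).toNat →
    (sbox.foldl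
      (fun (st : List (List Int) × Bool) byte =>
        if !st.2 then
          ((PySem.List.pyRange 0 amount 1).foldl
            (fun r n => r.modify n.toNat (fun l => l ++ [get_nth_bit byte n])) st.1, !st.2)
        else (st.1, !st.2))
      (R, skip)).1
      = R.mapIdx (fun i l => l ++ (pvTaken skip sbox).map (fun b => get_nth_bit b (i : Int))) := by
  intro sbox
  induction sbox with
  | nil =>
    intro skip R hR
    simp only [List.foldl_nil, pvTaken, List.map_nil, List.append_nil]
    exact (pv_mapIdx_id R).symm
  | cons byte rest ih =>
    intro skip R hR
    cases skip with
    | false =>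
      rw [List.foldl_cons]
      rw [show (if (!((R, false) : List (List Int) × Bool).2) = true then
            ((PySem.List.pyRange 0 amount 1).foldl
              (fun r n => r.modify n.toNat (fun l => l ++ [get_nth_bit byte n])) R, !(false : Bool))
          else (R, !(false : Bool)))
          = ((PySem.List.pyRange 0 amount 1).foldl
              (fun r n => r.modify n.toNat (fun l => l ++ [get_nth_bit byte n])) R, true) from rfl]
      rw [pv_inner_eq byte amount R hR,
        ih true _ (by rw [List.length_mapIdx]; exact hR), List.mapIdx_mapIdx]
      simp [pvTaken, Function.comp_def, List.append_assoc]
    | true =>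
      rw [List.foldl_cons]
      rw [show (if (!((R, true) : List (List Int) × Bool).2) = true then
            ((PySem.List.pyRange 0 amount 1).foldl
              (fun r n => r.modify n.toNat (fun l => l ++ [get_nth_bit byte n])) R, !(true : Bool))
          else (R, !(true : Bool))) = (R, false) from rfl]
      rw [ih false R hR]
      simp [pvTaken]

theorem pv_mapIdx_map_const (n : Nat) (h : Nat → List Int) :
    ((List.range n).map (fun _ => ([] : List Int))).mapIdx (fun i l => l ++ h i)
      = (List.range n).map h := by
  induction n generalizing h with
  | zero => rfl
  | succ m ih =>
    rw [List.range_succ_eq_map]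
    simp only [List.map_cons, List.map_map, List.mapIdx_cons, List.nil_append]
    rw [show ((List.range m).map ((fun _ => ([] : List Int)) ∘ (· + 1)))
        = (List.range m).map (fun _ => ([] : List Int)) from rfl,
      ih (fun i => h (i + 1))]
    simp [Function.comp]

-- ===== VERDICT (by name: the statement is the Claim_ definition above) =====
theorem extract_functions_from_sbox_spec : Claim_equal_extract_functions_from_sbox := by
  intro sbox amount _
  show extract_functions_from_sbox sbox amount = extract_functions_from_sbox_alt sbox amount
  unfold extract_functions_from_sbox extract_functions_from_sbox_alt
  rw [pv_foldl_append_nil, List.nil_append]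
  rw [pv_outer amount sbox false _
    (by rw [List.length_map, PySem.List.length_pyRange_one])]
  rw [pv_slice2, Option.getD_some, pv_foldl_peel, List.nil_append,
    PySem.List.length_pyRange_one, pv_peel_planes]
  rw [PySem.List.pyRange_one, List.map_map, pv_taken_evens]
  simp only [Function.comp_def]
  rw [pv_mapIdx_map_const]
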